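-- pv_equiv track=rewrite | github.com/oliver-singh/knots | invariants.py | _homology_generators
-- ===== SOURCE A (Python) =====
-- def _homology_generators(braid):
--     hom_generators = [0]*(len(braid)-1)
--     for i in range(len(braid)-1):
--         hom_generators[i] = 0
--         j = i+1
--         while hom_generators[i] == 0 and j < len(braid):
--             if abs(braid[i]) == abs(braid[j]):
--                 hom_generators[i] = j
--             j = j + 1
--     return hom_generators
-- ===== SOURCE B (Python) =====
-- def _homology_generators(braid):
--     # Right-to-left pass: a dict maps each |value| to the smallest index > current
--     # position holding that absolute value, so each entry is found in O(1).
--     nxt = {}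
--     rev = []
--     for i in range(len(braid) - 1, 0, -1):
--         nxt[abs(braid[i])] = i
--         rev.append(nxt.get(abs(braid[i - 1]), 0))
--     rev.reverse()
--     return rev
-- ===== Notes on version B (the rewrite author's own statement) =====
-- stated objective: faster
-- what changed: Replaced the per-index forward while-scan with a single right-to-left pass that keeps, in a dict, the nearest later index for each absolute value.
import Mathlib
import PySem

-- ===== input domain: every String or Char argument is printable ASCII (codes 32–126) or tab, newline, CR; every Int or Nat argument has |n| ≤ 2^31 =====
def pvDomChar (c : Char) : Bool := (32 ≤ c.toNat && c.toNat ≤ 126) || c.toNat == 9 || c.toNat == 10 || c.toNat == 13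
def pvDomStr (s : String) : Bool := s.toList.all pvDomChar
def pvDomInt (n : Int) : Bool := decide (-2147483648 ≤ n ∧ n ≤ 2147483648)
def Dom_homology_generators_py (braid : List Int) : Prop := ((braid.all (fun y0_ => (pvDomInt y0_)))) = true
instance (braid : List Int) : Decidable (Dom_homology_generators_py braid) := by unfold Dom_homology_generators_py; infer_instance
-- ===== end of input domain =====

-- B replaces A's per-index forward while-scan by one right-to-left pass with a dict
-- of the nearest later index per absolute value (objective: faster).

-- ===== PORT A =====
-- A's inner while loop; h is the running value of hom_generators[i], j the scan index
def whileA (braid : List Int) (i h j : Int) : Int :=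
  if _hc : h = 0 ∧ j < (braid.length : Int) then
    let h' := if |PySem.List.pyGetD braid i 0| = |PySem.List.pyGetD braid j 0| then j else h
    whileA braid i h' (j + 1)
  else h
termination_by ((braid.length : Int) - j).toNat
decreasing_by omega

def homology_generators_py (braid : List Int) : List Int :=
  let n : Int := (braid.length : Int)
  (PySem.List.pyRange 0 (n - 1) 1).foldl
    (fun hom i =>
      let hom := hom.set i.toNat 0
      hom.set i.toNat (whileA braid i 0 (i + 1)))
    (List.replicate (n - 1).toNat 0)

-- ===== PORT B =====
def homology_generators_py_alt (braid : List Int) : List Int :=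
  let n : Int := (braid.length : Int)
  let st := (PySem.List.pyRange (n - 1) 0 (-1)).foldl
    (fun (st : PySem.Dict Int Int × List Int) i =>
      let nxt := st.1.insert |PySem.List.pyGetD braid i 0| i
      (nxt, st.2 ++ [nxt.getD |PySem.List.pyGetD braid (i - 1) 0| 0]))
    (PySem.Dict.empty, [])
  st.2.reverse

-- ===== PRECONDITION & SPEC =====
def Spec_homology_generators_py (braid : List Int) (out : List Int) : Prop := out = homology_generators_py_alt braid
instance (braid : List Int) (out : List Int) : Decidable (Spec_homology_generators_py braid out) := by unfold Spec_homology_generators_py; infer_instance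

-- ===== CLAIM (what is proved, stated in full; the proofs are below) =====
def Claim_equal_homology_generators_py : Prop := ∀ (braid : List Int), Dom_homology_generators_py braid → Spec_homology_generators_py braid (homology_generators_py braid)

-- ===== LEMMAS AND PROOFS =====

-- common specification: first index ≥ j whose entry has absolute value a, else 0
def firstIdx (braid : List Int) (a : Int) (j : Nat) : Int :=
  if _h : j < braid.length then
    (if |braid.getD j 0| = a then (j : Int) else firstIdx braid a (j + 1))
  else 0
termination_by braid.length - j

def gSpec (braid : List Int) (k : Nat) : Int :=
  firstIdx braid |braid.getD k 0| (k + 1)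

lemma whileA_stop (braid : List Int) (i h j : Int) (hh : h ≠ 0) :
    whileA braid i h j = h := by
  unfold whileA
  simp [hh]

lemma whileA_eq_firstIdx (braid : List Int) (i : Int) (j : Nat) (hj : 1 ≤ j) :
    whileA braid i 0 (j : Int) = firstIdx braid |PySem.List.pyGetD braid i 0| j := by
  by_cases h : j < braid.length
  · rw [whileA, firstIdx]
    simp only [h, dif_pos, PySem.List.pyGetD_natCast]
    have hjl : (j : Int) < (braid.length : Int) := by exact_mod_cast h
    simp only [hjl, and_true]
    rw [dif_pos trivial]
    by_cases habs : |braid.getD j 0| = |PySem.List.pyGetD braid i 0|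
    · rw [if_pos habs.symm, if_pos habs, whileA_stop]
      exact_mod_cast Nat.one_le_iff_ne_zero.mp hj
    · rw [if_neg (fun e => habs e.symm), if_neg habs]
      have := whileA_eq_firstIdx braid i (j+1) (by omega)
      push_cast at this ⊢
      exact this
  · rw [whileA, firstIdx]
    have : ¬ ((j:Int) < (braid.length : Int)) := by exact_mod_cast h
    simp [this, h]
termination_by braid.length - j

lemma loopA (braid : List Int) (k : Nat) (hk : k ≤ braid.length - 1) :
    (List.range k).foldl
      (fun (hom : List Int) (kk : Nat) =>
        let i : Int := 0 + (kk : Int)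
        let hom := hom.set i.toNat 0
        hom.set i.toNat (whileA braid i 0 (i + 1)))
      (List.replicate (braid.length - 1) 0)
    = (List.range k).map (gSpec braid) ++ List.replicate (braid.length - 1 - k) 0 := by
  induction k with
  | zero => simp
  | succ k ih =>
    rw [List.range_succ, List.foldl_append, ih (by omega), List.map_append]
    simp only [List.foldl_cons, List.foldl_nil]
    have hcast : ((0 : Int) + (k : Int)).toNat = k := by omega
    have hlen : ((List.range k).map (gSpec braid)).length = k := by simp
    have hrep : List.replicate (braid.length - 1 - k) (0:Int)
        = 0 :: List.replicate (braid.length - 1 - (k+1)) 0 := by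
      rw [show braid.length - 1 - k = (braid.length - 1 - (k+1)) + 1 by omega]
      rfl
    rw [hcast, hrep]
    rw [List.set_append_right _ _ (by omega), List.set_append_right _ _ (by omega)]
    simp only [hlen, Nat.sub_self, List.set_cons_zero]
    have hw : whileA braid (0 + (k:Int)) 0 (0 + (k:Int) + 1) = gSpec braid k := by
      have := whileA_eq_firstIdx braid (k : Int) (k+1) (by omega)
      simp only [PySem.List.pyGetD_natCast] at this
      rw [show (0:Int) + (k:Int) = (k:Int) by ring, show ((k:Int) + 1) = ((k+1 : Nat) : Int) by push_cast; ring, this]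
      rfl
    rw [hw]
    simp

lemma loopB (braid : List Int) (t : Nat) (ht : t ≤ braid.length - 1)
    (d : PySem.Dict Int Int) (acc : List Int)
    (hd : ∀ a, d.getD a 0 = firstIdx braid a (t + 1)) :
    ((PySem.List.pyRange (t : Int) 0 (-1)).foldl
      (fun (st : PySem.Dict Int Int × List Int) i =>
        let nxt := st.1.insert |PySem.List.pyGetD braid i 0| i
        (nxt, st.2 ++ [nxt.getD |PySem.List.pyGetD braid (i - 1) 0| 0]))
      (d, acc)).2
    = acc ++ ((List.range t).map (gSpec braid)).reverse := by
  induction t generalizing d acc with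
  | zero =>
    rw [PySem.List.pyRange_neg_one_eq_nil (by omega)]
    simp
  | succ t ih =>
    have hlt : t + 1 < braid.length := by omega
    rw [PySem.List.pyRange_neg_one_cons (by omega)]
    simp only [List.foldl_cons]
    rw [show ((t + 1 : Nat) : Int) - 1 = (t : Int) by push_cast; ring]
    have hget : PySem.List.pyGetD braid ((t + 1 : Nat) : Int) 0 = braid.getD (t + 1) 0 :=
      PySem.List.pyGetD_natCast braid (t + 1) 0
    have hd' : ∀ a, (d.insert |PySem.List.pyGetD braid ((t + 1 : Nat) : Int) 0| ((t + 1 : Nat) : Int)).getD a 0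
        = firstIdx braid a (t + 1) := by
      intro a
      rw [PySem.Dict.getD_insert, hget, firstIdx]
      rw [dif_pos hlt]
      by_cases hc : a = |braid.getD (t + 1) 0|
      · rw [if_pos hc, if_pos hc.symm]
      · rw [if_neg hc, if_neg (fun e => hc e.symm), hd]
    have hv : (d.insert |PySem.List.pyGetD braid ((t + 1 : Nat) : Int) 0| ((t + 1 : Nat) : Int)).getD
        |PySem.List.pyGetD braid (t : Int) 0| 0 = gSpec braid t := by
      rw [hd' _, PySem.List.pyGetD_natCast]
      rfl
    rw [hv]
    rw [ih (by omega) _ _ hd']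
    rw [List.range_succ, List.map_append, List.reverse_append]
    simp

lemma a_eq_map (braid : List Int) :
    homology_generators_py braid = (List.range (braid.length - 1)).map (gSpec braid) := by
  unfold homology_generators_py
  dsimp only
  rw [PySem.List.pyRange_one]
  rw [List.foldl_map]
  have hm : (((braid.length : Int) - 1) - 0).toNat = braid.length - 1 := by omega
  have hm2 : (((braid.length : Int) - 1)).toNat = braid.length - 1 := by omega
  rw [hm, hm2]
  have := loopA braid (braid.length - 1) (le_refl _)
  rw [this]
  simp

lemma b_eq_map (braid : List Int) :
    homology_generators_py_alt braid = (List.range (braid.length - 1)).map (gSpec braid) := by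
  unfold homology_generators_py_alt
  dsimp only
  by_cases h0 : braid.length = 0
  · rw [PySem.List.pyRange_neg_one_eq_nil (by omega)]
    simp [h0]
  · have hcast : (braid.length : Int) - 1 = ((braid.length - 1 : Nat) : Int) := by omega
    rw [hcast]
    rw [loopB braid (braid.length - 1) (le_refl _) _ [] ?hd]
    · simp
    · intro a
      rw [firstIdx]
      rw [dif_neg (by omega)]
      simp [PySem.Dict.getD_empty]

-- ===== VERDICT (by name: the statement is the Claim_ definition above) =====
theorem homology_generators_py_spec : Claim_equal_homology_generators_py := by
  intro braid _
  unfold Spec_homology_generators_py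
  rw [a_eq_map, b_eq_map]
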